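-- pv_equiv track=rewrite | github.com/wahab-cide/DSA-Specialization | Industr Coding Framework/waterFlow.py | simulateWaterFlow
-- ===== SOURCE A (Python) =====
-- from collections import deque
--
-- def simulateWaterFlow(heights, startRow, startCol):
--     rows, cols = len(heights), len(heights[0])
--     wetTime = [[-1 for _ in range(cols)] for _ in range(rows)]
--     directions = [(-1, 0), (1, 0), (0, -1), (0, 1)]  # Up, Down, Left, Right
--
--     # BFS initialization
--     queue = deque([(startRow, startCol)])
--     wetTime[startRow][startCol] = 0  # Starting cell is wet at time 0
--
--     while queue:
--         row, col = queue.popleft()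
--         current_time = wetTime[row][col]
--
--         # Explore neighbors
--         for dr, dc in directions:
--             newRow, newCol = row + dr, col + dc
--
--             # Check bounds, height condition, and wetTime condition
--             if (0 <= newRow < rows and 0 <= newCol < cols and
--                 heights[newRow][newCol] <= heights[row][col] and
--                 wetTime[newRow][newCol] == -1):
--
--                 # Update the time step and add to the queue
--                 wetTime[newRow][newCol] = current_time + 1
--                 queue.append((newRow, newCol))
--
--     return wetTime
-- ===== SOURCE B (Python) =====
-- def simulateWaterFlow(heights, startRow, startCol):
--     rows, cols = len(heights), len(heights[0])
--     wetTime = [[-1] * cols for _ in range(rows)]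
--     wetTime[startRow][startCol] = 0
--     stack = [(startRow, startCol)]
--     while stack:
--         r, c = stack.pop()
--         d = wetTime[r][c] + 1
--         for nr, nc in ((r - 1, c), (r + 1, c), (r, c - 1), (r, c + 1)):
--             if (0 <= nr < rows and 0 <= nc < cols and
--                     heights[nr][nc] <= heights[r][c] and
--                     (wetTime[nr][nc] == -1 or d < wetTime[nr][nc])):
--                 wetTime[nr][nc] = d
--                 stack.append((nr, nc))
--     return wetTime
-- ===== Notes on version B (the rewrite author's own statement) =====
-- stated objective: alternative
-- what changed: Replaces the FIFO deque BFS (each cell receives its final time when first enqueued) by a stack-driven label-correcting shortest-path relaxation (Bellman-Ford-Moore): a cell's wetTime may be written several times, decreasing, until no improving relaxation remains; both compute the same fixpoint because wetTime is the unique labeling that is 0 at the source, consistent (each downhill step increases the label by at most 1) and supported (each label d has a neighbor labeled d-1).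
-- outside the precondition, e.g. on simulateWaterFlow([[1, 2], [3]], 0, 0): A returns [[0, -1], [-1, -1]], B returns [[0, -1], [-1, -1]]; on simulateWaterFlow([[1, 2], [3]], 1, 0): A raises IndexError, B raises IndexError
import Mathlib
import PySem

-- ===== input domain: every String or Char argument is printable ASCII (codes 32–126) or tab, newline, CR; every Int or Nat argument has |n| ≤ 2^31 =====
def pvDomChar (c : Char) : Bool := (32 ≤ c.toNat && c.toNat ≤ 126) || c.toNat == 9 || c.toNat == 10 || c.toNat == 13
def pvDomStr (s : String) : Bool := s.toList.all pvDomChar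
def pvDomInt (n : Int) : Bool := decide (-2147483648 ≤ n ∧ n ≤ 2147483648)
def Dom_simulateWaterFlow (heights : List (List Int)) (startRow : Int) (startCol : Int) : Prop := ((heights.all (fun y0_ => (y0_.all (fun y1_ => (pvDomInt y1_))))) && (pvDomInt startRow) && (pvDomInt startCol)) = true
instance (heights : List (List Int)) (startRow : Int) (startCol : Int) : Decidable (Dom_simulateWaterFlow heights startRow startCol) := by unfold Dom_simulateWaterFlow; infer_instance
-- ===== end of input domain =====

-- B replaces A's FIFO-deque BFS (each cell gets its final time at first enqueue) by a
-- stack-driven label-correcting relaxation (Bellman–Ford–Moore): a cell's time may be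
-- rewritten, decreasing, until a fixpoint; the return values agree on Pre_.

-- g[r][c] (Python indexing, negative r/c count from the end); exact whenever the indices are in
-- Python's accepted range — every pvRead the ports perform is either guarded by the same bounds
-- test the Python evaluates first, or in range by Pre_.
def pvRead (g : List (List Int)) (r c : Int) : Int :=
  PySem.List.pyGetD (PySem.List.pyGetD g r []) c 0

-- g[r][c] = v (Python item assignment on the row object); exact when in range (guards / Pre_).
def pvWrite (g : List (List Int)) (r c : Int) (v : Int) : List (List Int) :=
  PySem.List.pySetD g r (PySem.List.pySetD (PySem.List.pyGetD g r []) c v)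

-- ===== PORT A =====
-- A's 'for dr, dc in directions' loop body: writes wetTime, appends to the queue tail
def pvAVisit (heights : List (List Int)) (rows cols : Int) (wet : List (List Int))
    (row col t : Int) : (List (List Int)) × List (Int × Int) :=
  [((-1 : Int), (0 : Int)), (1, 0), (0, -1), (0, 1)].foldl
    (fun st d =>
      let newRow := row + d.1
      let newCol := col + d.2
      if 0 ≤ newRow ∧ newRow < rows ∧ 0 ≤ newCol ∧ newCol < cols ∧
          pvRead heights newRow newCol ≤ pvRead heights row col ∧
          pvRead st.1 newRow newCol = -1 then
        (pvWrite st.1 newRow newCol (t + 1), st.2 ++ [(newRow, newCol)])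
      else st)
    (wet, [])

-- A's 'while queue:' loop; fuel is only a termination guard (proved sufficient on Pre_)
def pvALoop (heights : List (List Int)) (rows cols : Int) :
    Nat → List (List Int) → List (Int × Int) → List (List Int)
  | 0, wet, _ => wet
  | _ + 1, wet, [] => wet
  | fuel + 1, wet, (row, col) :: queue =>
      let currentTime := pvRead wet row col
      let st := pvAVisit heights rows cols wet row col currentTime
      pvALoop heights rows cols fuel st.1 (queue ++ st.2)

def simulateWaterFlow (heights : List (List Int)) (startRow : Int) (startCol : Int) : List (List Int) :=
  let rows := heights.length
  let cols := (PySem.List.pyGetD heights 0 []).length   -- len(heights[0]); IndexError (heights = []) excluded by Pre_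
  let wetTime := List.replicate rows (List.replicate cols (-1 : Int))
  let wetTime1 := pvWrite wetTime startRow startCol 0
  pvALoop heights (rows : Int) (cols : Int) (10 * rows * cols + 4) wetTime1 [(startRow, startCol)]

-- ===== PORT B =====
-- Source B's 'while stack:' loop. The Lean list models Python's stack with its TOP AT THE HEAD
-- (Python appends and pops at the list's end): push = cons, pop = match on head; the inner
-- 'for nr, nc in (…)' loop is the foldl over the four literal neighbour pairs, relaxing a
-- neighbour whenever it is dry or its recorded time improves, and pushing it.
def pvBLoop (heights : List (List Int)) (rows cols : Int) :
    Nat → List (List Int) → List (Int × Int) → List (List Int)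
  | 0, wet, _ => wet
  | _ + 1, wet, [] => wet
  | fuel + 1, wet, (r, c) :: stack =>
      let d := pvRead wet r c + 1
      let st := [(r - 1, c), (r + 1, c), (r, c - 1), (r, c + 1)].foldl
        (fun st q =>
          if 0 ≤ q.1 ∧ q.1 < rows ∧ 0 ≤ q.2 ∧ q.2 < cols ∧
              pvRead heights q.1 q.2 ≤ pvRead heights r c ∧
              (pvRead st.1 q.1 q.2 = -1 ∨ d < pvRead st.1 q.1 q.2) then
            (pvWrite st.1 q.1 q.2 d, (q.1, q.2) :: st.2)
          else st)
        (wet, stack)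
      pvBLoop heights rows cols fuel st.1 st.2

def simulateWaterFlow_alt (heights : List (List Int)) (startRow : Int) (startCol : Int) : List (List Int) :=
  let rows := heights.length
  let cols := (PySem.List.pyGetD heights 0 []).length
  let wetTime := List.replicate rows (List.replicate cols (-1 : Int))
  let wetTime1 := pvWrite wetTime startRow startCol 0
  pvBLoop heights (rows : Int) (cols : Int) (3 * (rows * cols + 2) * (rows * cols + 2))
    wetTime1 [(startRow, startCol)]

-- ===== PRECONDITION & SPEC =====
-- Pre_ excludes: empty or zero-width grids and start coordinates outside Python's index range,
-- where A raises IndexError, and ragged grids having a row shorter than row 0, where A raises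
-- IndexError as soon as the flood reaches a missing cell (on the remaining ragged grids A happens
-- to return; they are excluded with the rest of the ragged grids — see the cite in claim.json).
def Pre_simulateWaterFlow (heights : List (List Int)) (startRow : Int) (startCol : Int) : Prop :=
  heights ≠ [] ∧ 0 < heights.headI.length ∧
  (∀ row ∈ heights, heights.headI.length ≤ row.length) ∧
  -(heights.length : Int) ≤ startRow ∧ startRow < heights.length ∧
  -(heights.headI.length : Int) ≤ startCol ∧ startCol < heights.headI.length
instance (heights : List (List Int)) (startRow : Int) (startCol : Int) : Decidable (Pre_simulateWaterFlow heights startRow startCol) := by unfold Pre_simulateWaterFlow; infer_instance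

def pvWitness_simulateWaterFlow : List (List Int) × Int × Int := ([[3, 1], [2, 2]], 0, 1)

def Spec_simulateWaterFlow (heights : List (List Int)) (startRow : Int) (startCol : Int) (out : List (List Int)) : Prop := out = simulateWaterFlow_alt heights startRow startCol
instance (heights : List (List Int)) (startRow : Int) (startCol : Int) (out : List (List Int)) : Decidable (Spec_simulateWaterFlow heights startRow startCol out) := by unfold Spec_simulateWaterFlow; infer_instance

-- ===== CLAIM (what is proved, stated in full; the proofs are below) =====
def Claim_equal_simulateWaterFlow : Prop := ∀ (heights : List (List Int)) (startRow : Int) (startCol : Int), Dom_simulateWaterFlow heights startRow startCol → Pre_simulateWaterFlow heights startRow startCol → Spec_simulateWaterFlow heights startRow startCol (simulateWaterFlow heights startRow startCol)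

-- ===== LEMMAS AND PROOFS =====

-- Python's normalised index for -n ≤ i < n
def pvNorm (n : Nat) (i : Int) : Nat := if 0 ≤ i then i.toNat else n - (-i).toNat

-- grid shape and in-range predicates
def pvSh (R C : Nat) (g : List (List Int)) : Prop := g.length = R ∧ ∀ row ∈ g, row.length = C
def pvInR (R C : Nat) (p : Int × Int) : Prop :=
  -(R : Int) ≤ p.1 ∧ p.1 < R ∧ -(C : Int) ≤ p.2 ∧ p.2 < C
def pvCount (g : List (List Int)) : Nat := (g.map (fun row => row.countP (fun x => decide (x = -1)))).sum

-- Nat-indexed read/write on a grid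
def pvNRead (g : List (List Int)) (i j : Nat) : Int := (g.getD i []).getD j 0
def pvNWrite (g : List (List Int)) (i j : Nat) (v : Int) : List (List Int) :=
  g.set i ((g.getD i []).set j v)

-- per-slot view: slots are Nat pairs
def pvValidU (R C : Nat) (u : Nat × Nat) : Prop := u.1 < R ∧ u.2 < C
def pvVal (g : List (List Int)) (u : Nat × Nat) : Int := pvNRead g u.1 u.2
def pvToSlot (q : Int × Int) : Nat × Nat := (q.1.toNat, q.2.toNat)
def pvSlotOf (R C : Nat) (e : Int × Int) : Nat × Nat := (pvNorm R e.1, pvNorm C e.2)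
def pvSrcSlot (R C : Nat) (sr sc : Int) : Nat × Nat := pvSlotOf R C (sr, sc)
-- the canonical coordinate pair both programs use for a slot: the raw start pair for the
-- source slot (both programs compute the source's neighbours from the RAW coordinates),
-- the nonnegative pair otherwise
def pvCanon (R C : Nat) (sr sc : Int) (u : Nat × Nat) : Int × Int :=
  if u = pvSrcSlot R C sr sc then (sr, sc) else ((u.1 : Int), (u.2 : Int))
def pvNbrs (e : Int × Int) : List (Int × Int) :=
  [(e.1 - 1, e.2), (e.1 + 1, e.2), (e.1, e.2 - 1), (e.1, e.2 + 1)]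
-- the guard both programs test before flowing from pair e to pair q (minus the wetTime test)
def pvOk (heights : List (List Int)) (R C : Nat) (e q : Int × Int) : Prop :=
  0 ≤ q.1 ∧ q.1 < (R : Int) ∧ 0 ≤ q.2 ∧ q.2 < (C : Int) ∧
    pvRead heights q.1 q.2 ≤ pvRead heights e.1 e.2
-- the flow graph on slots both programs explore
def pvEdge (heights : List (List Int)) (R C : Nat) (sr sc : Int) (u v : Nat × Nat) : Prop :=
  ∃ q ∈ pvNbrs (pvCanon R C sr sc u), pvOk heights R C (pvCanon R C sr sc u) q ∧ v = pvToSlot q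
-- worklist entries are canonical pairs
def pvEntry (R C : Nat) (sr sc : Int) (e : Int × Int) : Prop :=
  e = (sr, sc) ∨ (0 ≤ e.1 ∧ e.1 < (R : Int) ∧ 0 ≤ e.2 ∧ e.2 < (C : Int) ∧
    pvSlotOf R C e ≠ pvSrcSlot R C sr sc)
-- all out-edges of u are relaxed in g
def pvOBL (heights : List (List Int)) (R C : Nat) (sr sc : Int) (g : List (List Int))
    (u : Nat × Nat) : Prop :=
  ∀ v, pvEdge heights R C sr sc u v → pvVal g v ≠ -1 ∧ pvVal g v ≤ pvVal g u + 1
-- every positive label has a supporting predecessor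
def pvSupp (heights : List (List Int)) (R C : Nat) (sr sc : Int) (g : List (List Int)) : Prop :=
  ∀ v, pvValidU R C v → 1 ≤ pvVal g v →
    ∃ u, pvValidU R C u ∧ pvEdge heights R C sr sc u v ∧ pvVal g u = pvVal g v - 1

-- what A's BFS leaves behind: shape, labels ≥ -1, source 0, 0 only at the source,
-- all out-edges of wet cells relaxed (consistency), and support
def pvPost (heights : List (List Int)) (R C : Nat) (sr sc : Int) (g : List (List Int)) : Prop :=
  pvSh R C g ∧
  (∀ u, pvValidU R C u → -1 ≤ pvVal g u) ∧
  pvVal g (pvSrcSlot R C sr sc) = 0 ∧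
  (∀ u, pvValidU R C u → pvVal g u = 0 → u = pvSrcSlot R C sr sc) ∧
  (∀ u, pvValidU R C u → pvVal g u ≠ -1 → pvOBL heights R C sr sc g u) ∧
  pvSupp heights R C sr sc g

-- B's fuel potential: a dry cell costs R*C+1, a wet cell its label
def pvPot (R C : Nat) (g : List (List Int)) : Int :=
  (g.map (fun row => (row.map (fun x => if x = -1 then ((R * C : Nat) : Int) + 1 else x)).sum)).sum

-- ---------- index and pointwise-update lemmas ----------

lemma pvNorm_lt (n : Nat) (i : Int) (h1 : -(n : Int) ≤ i) (h2 : i < n) : pvNorm n i < n := by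
  simp only [pvNorm]; split_ifs with h <;> omega

lemma pvNorm_nonneg (n : Nat) (i : Int) (h : 0 ≤ i) : pvNorm n i = i.toNat := by
  simp [pvNorm, h]

lemma pyIdx?_eq_norm (n : Nat) (i : Int) (h1 : -(n : Int) ≤ i) (h2 : i < n) :
    PySem.List.pyIdx? n i = some (pvNorm n i) := by
  simp only [PySem.List.pyIdx?, pvNorm]
  split_ifs with h h' <;> simp_all <;> omega

lemma pyGetD_norm {α : Type} (xs : List α) (i : Int) (d : α)
    (h1 : -(xs.length : Int) ≤ i) (h2 : i < xs.length) :
    PySem.List.pyGetD xs i d = xs.getD (pvNorm xs.length i) d := by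
  simp [PySem.List.pyGetD, PySem.List.pyGet?, pyIdx?_eq_norm _ _ h1 h2,
    List.getD_eq_getElem?_getD]

lemma pySetD_norm {α : Type} (xs : List α) (i : Int) (v : α)
    (h1 : -(xs.length : Int) ≤ i) (h2 : i < xs.length) :
    PySem.List.pySetD xs i v = xs.set (pvNorm xs.length i) v := by
  simp [PySem.List.pySetD, PySem.List.pySet?, pyIdx?_eq_norm _ _ h1 h2]

lemma pvRow_len {R C : Nat} {g : List (List Int)} (hsh : pvSh R C g) {i : Nat} (hi : i < R) :
    (g.getD i []).length = C := by
  obtain ⟨hlen, hrow⟩ := hsh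
  have hi' : i < g.length := by omega
  rw [List.getD_eq_getElem g [] hi']
  exact hrow _ (List.getElem_mem hi')

lemma pvRead_eq {R C : Nat} {g : List (List Int)} (hsh : pvSh R C g) {p : Int × Int}
    (hp : pvInR R C p) : pvRead g p.1 p.2 = pvVal g (pvSlotOf R C p) := by
  obtain ⟨hlen, hrow⟩ := hsh
  obtain ⟨a1, a2, a3, a4⟩ := hp
  have e1 : PySem.List.pyGetD g p.1 [] = g.getD (pvNorm R p.1) [] := by
    have h := pyGetD_norm g p.1 [] (by rw [hlen]; exact a1) (by rw [hlen]; exact a2)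
    rwa [hlen] at h
  have hlen2 : (g.getD (pvNorm R p.1) []).length = C :=
    pvRow_len ⟨hlen, hrow⟩ (pvNorm_lt R p.1 a1 a2)
  have e2 := pyGetD_norm (g.getD (pvNorm R p.1) []) p.2 0
    (by rw [hlen2]; exact a3) (by rw [hlen2]; exact a4)
  rw [hlen2] at e2
  simp only [pvRead, pvVal, pvNRead, pvSlotOf]
  rw [e1, e2]

lemma pvWrite_eq {R C : Nat} {g : List (List Int)} (hsh : pvSh R C g) {p : Int × Int}
    (hp : pvInR R C p) (v : Int) :
    pvWrite g p.1 p.2 v = pvNWrite g (pvNorm R p.1) (pvNorm C p.2) v := by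
  obtain ⟨hlen, hrow⟩ := hsh
  obtain ⟨a1, a2, a3, a4⟩ := hp
  have e1 : PySem.List.pyGetD g p.1 [] = g.getD (pvNorm R p.1) [] := by
    have h := pyGetD_norm g p.1 [] (by rw [hlen]; exact a1) (by rw [hlen]; exact a2)
    rwa [hlen] at h
  have hlen2 : (g.getD (pvNorm R p.1) []).length = C :=
    pvRow_len ⟨hlen, hrow⟩ (pvNorm_lt R p.1 a1 a2)
  have e2 : PySem.List.pySetD (g.getD (pvNorm R p.1) []) p.2 v
      = (g.getD (pvNorm R p.1) []).set (pvNorm C p.2) v := by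
    have h := pySetD_norm (g.getD (pvNorm R p.1) []) p.2 v
      (by rw [hlen2]; exact a3) (by rw [hlen2]; exact a4)
    rwa [hlen2] at h
  have e3 : PySem.List.pySetD g p.1 ((g.getD (pvNorm R p.1) []).set (pvNorm C p.2) v)
      = g.set (pvNorm R p.1) ((g.getD (pvNorm R p.1) []).set (pvNorm C p.2) v) := by
    have h := pySetD_norm g p.1 ((g.getD (pvNorm R p.1) []).set (pvNorm C p.2) v)
      (by rw [hlen]; exact a1) (by rw [hlen]; exact a2)
    rwa [hlen] at h
  simp only [pvWrite, pvNWrite]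
  rw [e1, e2, e3]

lemma pvSh_pvNWrite {R C : Nat} {g : List (List Int)} (hsh : pvSh R C g) (i j : Nat) (v : Int)
    (hi : i < R) : pvSh R C (pvNWrite g i j v) := by
  obtain ⟨hlen, hrow⟩ := hsh
  constructor
  · simp [pvNWrite, hlen]
  · intro row hm
    rcases List.mem_or_eq_of_mem_set hm with h | h
    · exact hrow _ h
    · subst h
      rw [List.length_set]
      exact pvRow_len ⟨hlen, hrow⟩ hi

lemma pvGetD_set_eq {α : Type} : ∀ (l : List α) (i : Nat) (v d : α), i < l.length →
    (l.set i v).getD i d = v := by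
  intro l
  induction l with
  | nil => intro i v d h; simp at h
  | cons a t ih =>
    intro i v d h
    cases i with
    | zero => simp
    | succ n => simpa using ih n v d (by simpa using h)

lemma pvGetD_set_ne {α : Type} : ∀ (l : List α) (i i' : Nat) (v d : α), i' ≠ i →
    (l.set i v).getD i' d = l.getD i' d := by
  intro l
  induction l with
  | nil => intro i i' v d h; simp
  | cons a t ih =>
    intro i i' v d h
    cases i with
    | zero => cases i' with
      | zero => omega
      | succ m => simp
    | succ n => cases i' with
      | zero => simp
      | succ m => simpa using ih n m v d (by omega)

lemma pvVal_pvNWrite {R C : Nat} {g : List (List Int)} (hsh : pvSh R C g)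
    {w : Nat × Nat} (hw : pvValidU R C w) (v : Int) (u : Nat × Nat) :
    pvVal (pvNWrite g w.1 w.2 v) u = if u = w then v else pvVal g u := by
  obtain ⟨hlen, hrow⟩ := hsh
  obtain ⟨hw1, hw2⟩ := hw
  simp only [pvVal, pvNRead, pvNWrite]
  by_cases hii : u.1 = w.1
  · rw [hii, pvGetD_set_eq _ _ _ _ (by omega)]
    by_cases hjj : u.2 = w.2
    · rw [hjj, pvGetD_set_eq _ _ _ _ (by rw [pvRow_len ⟨hlen, hrow⟩ hw1]; exact hw2)]
      have : u = w := Prod.ext hii hjj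
      simp [this]
    · rw [pvGetD_set_ne _ _ _ _ _ hjj]
      have : u ≠ w := fun h => hjj (by rw [h])
      simp [this]
  · rw [pvGetD_set_ne _ _ _ _ _ hii]
    have : u ≠ w := fun h => hii (by rw [h])
    simp [this]

lemma pvCountP_set (l : List Int) (v : Int) : ∀ j : Nat, j < l.length → l.getD j 0 = -1 → v ≠ -1 →
    (l.set j v).countP (fun x => decide (x = -1)) + 1 = l.countP (fun x => decide (x = -1)) := by
  induction l with
  | nil => intro j hj; simp at hj
  | cons a t ih =>
    intro j hj ha hv
    cases j with
    | zero =>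
      simp only [List.getD_cons_zero] at ha
      subst ha
      simp [List.countP_cons, hv]
    | succ n =>
      have h := ih n (by simpa using hj) (by simpa using ha) hv
      simp only [List.set_cons_succ, List.countP_cons]
      omega

lemma pvCount_set (r' : List Int) :
    ∀ (g : List (List Int)) (i : Nat), i < g.length →
    pvCount (g.set i r') + (g.getD i []).countP (fun x => decide (x = -1))
      = pvCount g + r'.countP (fun x => decide (x = -1)) := by
  intro g
  induction g with
  | nil => intro i h; simp at h
  | cons a t ih =>
    intro i hi
    cases i with
    | zero => simp [pvCount]; omega
    | succ n =>
      have h := ih n (by simpa using hi)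
      simp only [List.set_cons_succ, List.getD_cons_succ, pvCount, List.map_cons, List.sum_cons] at h ⊢
      omega

lemma pvCount_pvNWrite {R C : Nat} {g : List (List Int)} (hsh : pvSh R C g)
    {w : Nat × Nat} (hw : pvValidU R C w) {v : Int} (hread : pvVal g w = -1) (hv : v ≠ -1) :
    pvCount (pvNWrite g w.1 w.2 v) + 1 = pvCount g := by
  obtain ⟨hlen, hrow⟩ := hsh
  obtain ⟨hw1, hw2⟩ := hw
  have hg : w.1 < g.length := by omega
  have h1 := pvCount_set ((g.getD w.1 []).set w.2 v) g w.1 hg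
  have h2 := pvCountP_set (g.getD w.1 []) v w.2
    (by rw [pvRow_len ⟨hlen, hrow⟩ hw1]; exact hw2) (by exact hread) hv
  simp only [pvNWrite]
  omega

lemma pvCountP_set_ne (l : List Int) (v : Int) : ∀ j : Nat, j < l.length → l.getD j 0 ≠ -1 → v ≠ -1 →
    (l.set j v).countP (fun x => decide (x = -1)) = l.countP (fun x => decide (x = -1)) := by
  induction l with
  | nil => intro j hj; simp at hj
  | cons a t ih =>
    intro j hj ha hv
    cases j with
    | zero =>
      simp only [List.getD_cons_zero] at ha
      simp [List.countP_cons, hv, ha]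
    | succ n =>
      have h := ih n (by simpa using hj) (by simpa using ha) hv
      simp only [List.set_cons_succ, List.countP_cons]
      omega

lemma pvCount_pvNWrite_wet {R C : Nat} {g : List (List Int)} (hsh : pvSh R C g)
    {w : Nat × Nat} (hw : pvValidU R C w) {v : Int} (hread : pvVal g w ≠ -1) (hv : v ≠ -1) :
    pvCount (pvNWrite g w.1 w.2 v) = pvCount g := by
  obtain ⟨hlen, hrow⟩ := hsh
  obtain ⟨hw1, hw2⟩ := hw
  have hg : w.1 < g.length := by omega
  have h1 := pvCount_set ((g.getD w.1 []).set w.2 v) g w.1 hg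
  have h2 := pvCountP_set_ne (g.getD w.1 []) v w.2
    (by rw [pvRow_len ⟨hlen, hrow⟩ hw1]; exact hw2) (by exact hread) hv
  simp only [pvNWrite]
  omega

lemma pvCountP_repl (n : Nat) :
    (List.replicate n (-1 : Int)).countP (fun x => decide (x = -1)) = n := by
  induction n with
  | zero => simp
  | succ m ih => simp [List.replicate_succ, List.countP_cons, ih]

-- pointwise lower bound transported to list membership
lemma pvGe_of_lb {R C : Nat} {g : List (List Int)} (hsh : pvSh R C g)
    (hlb : ∀ u, pvValidU R C u → -1 ≤ pvVal g u) :
    ∀ row ∈ g, ∀ x ∈ row, -1 ≤ x := by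
  intro row hr x hx
  obtain ⟨hlen, hrow⟩ := hsh
  obtain ⟨i, hi, rfl⟩ := List.mem_iff_getElem.mp hr
  obtain ⟨j, hj, rfl⟩ := List.mem_iff_getElem.mp hx
  have h := hlb (i, j) ⟨by omega, by rw [← hrow _ (List.getElem_mem hi)]; exact hj⟩
  simp only [pvVal, pvNRead] at h
  rwa [List.getD_eq_getElem g [] hi, List.getD_eq_getElem _ 0 hj] at h

-- ---------- pvPot update lemmas ----------

lemma pvRowPot_set (K : Int) (v : Int) :
    ∀ (l : List Int) (j : Nat), j < l.length →
    ((l.set j v).map (fun x => if x = -1 then K else x)).sum + (if l.getD j 0 = -1 then K else l.getD j 0)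
      = (l.map (fun x => if x = -1 then K else x)).sum + (if v = -1 then K else v) := by
  intro l
  induction l with
  | nil => intro j h; simp at h
  | cons a t ih =>
    intro j hj
    cases j with
    | zero => simp [List.set_cons_zero]; ring
    | succ n =>
      have h := ih n (by simpa using hj)
      simp only [List.set_cons_succ, List.getD_cons_succ, List.map_cons, List.sum_cons]
      omega

lemma pvPot_set (R C : Nat) (r' : List Int) :
    ∀ (g : List (List Int)) (i : Nat), i < g.length →
    pvPot R C (g.set i r') + ((g.getD i []).map (fun x => if x = -1 then ((R*C : Nat) : Int) + 1 else x)).sum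
      = pvPot R C g + (r'.map (fun x => if x = -1 then ((R*C : Nat) : Int) + 1 else x)).sum := by
  intro g
  induction g with
  | nil => intro i h; simp at h
  | cons a t ih =>
    intro i hi
    cases i with
    | zero => simp [pvPot]; ring
    | succ n =>
      have h := ih n (by simpa using hi)
      simp only [List.set_cons_succ, List.getD_cons_succ, pvPot, List.map_cons, List.sum_cons] at h ⊢
      omega

lemma pvPot_pvNWrite {R C : Nat} {g : List (List Int)} (hsh : pvSh R C g)
    {w : Nat × Nat} (hw : pvValidU R C w) (v : Int) :
    pvPot R C (pvNWrite g w.1 w.2 v) + (if pvVal g w = -1 then ((R*C : Nat) : Int) + 1 else pvVal g w)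
      = pvPot R C g + (if v = -1 then ((R*C : Nat) : Int) + 1 else v) := by
  obtain ⟨hlen, hrow⟩ := hsh
  obtain ⟨hw1, hw2⟩ := hw
  have hg : w.1 < g.length := by omega
  have hj : w.2 < (g.getD w.1 []).length := by rw [pvRow_len ⟨hlen, hrow⟩ hw1]; exact hw2
  have h1 := pvPot_set R C ((g.getD w.1 []).set w.2 v) g w.1 hg
  have h2 := pvRowPot_set (((R*C : Nat) : Int) + 1) v (g.getD w.1 []) w.2 hj
  simp only [pvNWrite, pvVal, pvNRead]
  omega

lemma pvPot_nonneg {R C : Nat} {g : List (List Int)}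
    (hlb : ∀ u, pvValidU R C u → -1 ≤ pvVal g u) (hsh : pvSh R C g) : 0 ≤ pvPot R C g := by
  have hge := pvGe_of_lb hsh hlb
  apply List.sum_nonneg
  intro x hx
  obtain ⟨row, hm, rfl⟩ := List.mem_map.mp hx
  apply List.sum_nonneg
  intro y hy
  obtain ⟨z, hz, rfl⟩ := List.mem_map.mp hy
  have := hge row hm z hz
  split_ifs <;> [positivity; omega]

lemma pvPot_init (R C : Nat) :
    pvPot R C (List.replicate R (List.replicate C (-1 : Int)))
      = ((R * C : Nat) : Int) * (((R * C : Nat) : Int) + 1) := by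
  simp only [pvPot, List.map_replicate, List.sum_replicate, if_pos rfl, smul_eq_mul]
  push_cast
  ring

-- ---------- slot conversions ----------

lemma pvSlotOf_nonneg {R C : Nat} {q : Int × Int} (h1 : 0 ≤ q.1) (h2 : 0 ≤ q.2) :
    pvSlotOf R C q = pvToSlot q := by
  simp [pvSlotOf, pvToSlot, pvNorm_nonneg, h1, h2]

lemma pvValidU_slotOf {R C : Nat} {q : Int × Int} (hq : pvInR R C q) :
    pvValidU R C (pvSlotOf R C q) :=
  ⟨pvNorm_lt R q.1 hq.1 hq.2.1, pvNorm_lt C q.2 hq.2.2.1 hq.2.2.2⟩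

lemma pvOk_inR {heights : List (List Int)} {R C : Nat} {e q : Int × Int}
    (h : pvOk heights R C e q) : pvInR R C q := by
  obtain ⟨h1, h2, h3, h4, _⟩ := h
  exact ⟨by omega, h2, by omega, h4⟩

lemma pvEntry_canon {R C : Nat} {sr sc : Int} {e : Int × Int}
    (hsrc : pvInR R C (sr, sc)) (he : pvEntry R C sr sc e) :
    pvCanon R C sr sc (pvSlotOf R C e) = e ∧ pvInR R C e ∧ pvValidU R C (pvSlotOf R C e) := by
  rcases he with rfl | ⟨h1, h2, h3, h4, h5⟩
  · refine ⟨?_, hsrc, pvValidU_slotOf hsrc⟩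
    simp [pvCanon, pvSrcSlot]
  · have hin : pvInR R C e := ⟨by omega, h2, by omega, h4⟩
    refine ⟨?_, hin, pvValidU_slotOf hin⟩
    rw [pvCanon, if_neg h5]
    rw [pvSlotOf_nonneg h1 h3]
    simp only [pvToSlot]
    have e1 : ((e.1.toNat : Nat) : Int) = e.1 := Int.toNat_of_nonneg h1
    have e2 : ((e.2.toNat : Nat) : Int) = e.2 := Int.toNat_of_nonneg h3
    rw [Prod.ext_iff]
    exact ⟨e1, e2⟩

lemma pvEdge_valid {heights : List (List Int)} {R C : Nat} {sr sc : Int} {u v : Nat × Nat}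
    (h : pvEdge heights R C sr sc u v) : pvValidU R C v := by
  obtain ⟨q, _, hok, rfl⟩ := h
  obtain ⟨h1, h2, h3, h4, _⟩ := hok
  constructor
  · simp only [pvToSlot]; omega
  · simp only [pvToSlot]; omega

-- ---------- A's BFS: invariant and result characterization ----------

-- the body of A's direction fold, on neighbour pair q of the popped pair (er, ec)
def pvAStep (heights : List (List Int)) (rows cols er ec t : Int)
    (st : List (List Int) × List (Int × Int)) (q : Int × Int) :
    List (List Int) × List (Int × Int) :=
  if 0 ≤ q.1 ∧ q.1 < rows ∧ 0 ≤ q.2 ∧ q.2 < cols ∧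
      pvRead heights q.1 q.2 ≤ pvRead heights er ec ∧
      pvRead st.1 q.1 q.2 = -1 then
    (pvWrite st.1 q.1 q.2 (t + 1), st.2 ++ [(q.1, q.2)])
  else st

-- state of A's inner direction fold over processed prefix P, relative to the grid g0 at the pop
def pvSA (heights : List (List Int)) (R C : Nat) (g0 : List (List Int)) (e : Int × Int)
    (t : Int) (P : List (Int × Int)) (st : List (List Int) × List (Int × Int)) : Prop :=
  pvSh R C st.1 ∧
  (∀ u, pvValidU R C u → pvVal g0 u ≠ -1 → pvVal st.1 u = pvVal g0 u) ∧
  (∀ u, pvValidU R C u → -1 ≤ pvVal st.1 u) ∧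
  (∀ u, pvValidU R C u → pvVal st.1 u ≠ pvVal g0 u →
    pvVal g0 u = -1 ∧ pvVal st.1 u = t + 1 ∧ ∃ p ∈ st.2, u = pvToSlot p) ∧
  (∀ q ∈ P, pvOk heights R C e q → pvVal st.1 (pvToSlot q) ≠ -1 ∧ pvVal st.1 (pvToSlot q) ≤ t + 1) ∧
  (∀ p ∈ st.2, p ∈ P ∧ pvOk heights R C e p ∧ pvVal g0 (pvToSlot p) = -1 ∧
    pvVal st.1 (pvToSlot p) = t + 1) ∧
  pvCount st.1 + st.2.length = pvCount g0

lemma pvSA_step {heights : List (List Int)} {R C : Nat} {g0 : List (List Int)} {e : Int × Int}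
    {t : Int} {P : List (Int × Int)} {g : List (List Int)} {out : List (Int × Int)}
    (q : Int × Int)
    (hub : ∀ u, pvValidU R C u → pvVal g0 u ≠ -1 → pvVal g0 u ≤ t + 1) (ht : 0 ≤ t)
    (h : pvSA heights R C g0 e t P (g, out)) :
    pvSA heights R C g0 e t (P ++ [q])
      (pvAStep heights (R : Int) (C : Int) e.1 e.2 t (g, out) q) := by
  obtain ⟨s1, s2, slb, s3, s4, s5, s6⟩ := h
  simp only at s1 s2 slb s3 s4 s5 s6
  rw [pvAStep]
  -- any wet cell of g is ≤ t + 1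
  have hwub : ∀ u, pvValidU R C u → pvVal g u ≠ -1 → pvVal g u ≤ t + 1 := by
    intro u hu hw
    by_cases hch : pvVal g u = pvVal g0 u
    · rw [hch]; exact hub u hu (by rw [← hch]; exact hw)
    · exact le_of_eq (s3 u hu hch).2.1
  by_cases hg : 0 ≤ q.1 ∧ q.1 < (R : Int) ∧ 0 ≤ q.2 ∧ q.2 < (C : Int) ∧
      pvRead heights q.1 q.2 ≤ pvRead heights e.1 e.2 ∧ pvRead g q.1 q.2 = -1
  · rw [if_pos hg]
    obtain ⟨h1, h2, h3, h4, h5, h6⟩ := hg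
    have hqin : pvInR R C q := ⟨by omega, h2, by omega, h4⟩
    have hok : pvOk heights R C e q := ⟨h1, h2, h3, h4, h5⟩
    have hslot : pvSlotOf R C q = pvToSlot q := pvSlotOf_nonneg h1 h3
    set w := pvToSlot q with hw
    have hwv : pvValidU R C w := by rw [← hslot]; exact pvValidU_slotOf hqin
    have hgw : pvVal g w = -1 := by rw [← hslot, ← pvRead_eq s1 hqin]; exact h6
    have hwr : pvWrite g q.1 q.2 (t + 1) = pvNWrite g w.1 w.2 (t + 1) := by
      rw [pvWrite_eq s1 hqin (t + 1), ← hslot]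
      rfl
    have hval : ∀ u, pvVal (pvWrite g q.1 q.2 (t + 1)) u = if u = w then t + 1 else pvVal g u := by
      intro u; rw [hwr]; exact pvVal_pvNWrite s1 hwv (t + 1) u
    have hg0w : pvVal g0 w = -1 := by
      by_contra hne
      exact hne ((s2 w hwv hne).symm.trans hgw)
    refine ⟨?_, ?_, ?_, ?_, ?_, ?_, ?_⟩
    · rw [hwr]; exact pvSh_pvNWrite s1 w.1 w.2 (t + 1) hwv.1
    · intro u hu hw0
      rw [hval u]
      split_ifs with hc
      · subst hc; exact absurd hg0w hw0
      · exact s2 u hu hw0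
    · intro u hu
      rw [hval u]
      split_ifs with hc
      · omega
      · exact slb u hu
    · intro u hu hch
      rw [hval u] at hch ⊢
      by_cases hc : u = w
      · subst hc
        rw [if_pos rfl] at hch ⊢
        exact ⟨hg0w, rfl, ⟨(q.1, q.2), by simp, by simp [hw, pvToSlot]⟩⟩
      · rw [if_neg hc] at hch ⊢
        obtain ⟨a1, a2, p, hp, a3⟩ := s3 u hu hch
        exact ⟨a1, a2, p, by simp [hp], a3⟩
    · intro q' hq' hok'
      rcases List.mem_append.mp hq' with hm | hm
      · have old := s4 q' hm hok'
        rw [hval (pvToSlot q')]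
        split_ifs with hc
        · constructor <;> omega
        · exact old
      · simp only [List.mem_singleton] at hm
        subst hm
        rw [hval (pvToSlot q'), if_pos rfl]
        constructor <;> omega
    · intro p hp
      rcases List.mem_append.mp hp with hm | hm
      · obtain ⟨a1, a2, a3, a4⟩ := s5 p hm
        refine ⟨by simp [a1], a2, a3, ?_⟩
        rw [hval (pvToSlot p)]
        split_ifs with hc
        · rfl
        · exact a4
      · simp only [List.mem_singleton] at hm
        subst hm
        have hqq : ((q.1, q.2) : Int × Int) = q := rfl
        rw [hqq]
        refine ⟨by simp, hok, hg0w, ?_⟩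
        rw [hval w, if_pos rfl]
    · show pvCount (pvWrite g q.1 q.2 (t + 1)) + (out ++ [(q.1, q.2)]).length = pvCount g0
      have hc := pvCount_pvNWrite (v := t + 1) s1 hwv hgw (by omega)
      rw [hwr]
      simp only [List.length_append, List.length_cons, List.length_nil]
      omega
  · rw [if_neg hg]
    refine ⟨s1, s2, slb, ?_, ?_, ?_, s6⟩
    · intro u hu hch
      obtain ⟨a1, a2, p, hp, a3⟩ := s3 u hu hch
      exact ⟨a1, a2, p, hp, a3⟩
    · intro q' hq' hok'
      rcases List.mem_append.mp hq' with hm | hm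
      · exact s4 q' hm hok'
      · simp only [List.mem_singleton] at hm
        subst hm
        have hqin : pvInR R C q' := pvOk_inR hok'
        have hnw : pvRead g q'.1 q'.2 ≠ -1 := by
          intro hcon
          obtain ⟨h1, h2, h3, h4, h5⟩ := hok'
          exact hg ⟨h1, h2, h3, h4, h5, hcon⟩
        have hslot : pvSlotOf R C q' = pvToSlot q' := pvSlotOf_nonneg hok'.1 hok'.2.2.1
        rw [pvRead_eq s1 hqin, hslot] at hnw
        exact ⟨hnw, hwub (pvToSlot q') (by rw [← hslot]; exact pvValidU_slotOf hqin) hnw⟩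
    · intro p hp
      obtain ⟨a1, a2, a3, a4⟩ := s5 p hp
      exact ⟨by simp [a1], a2, a3, a4⟩

-- the whole direction fold of one A pop, characterized
lemma pvAVisit_SA {heights : List (List Int)} {R C : Nat} {g0 : List (List Int)} (e : Int × Int)
    {t : Int}
    (hsh : pvSh R C g0) (hlb : ∀ u, pvValidU R C u → -1 ≤ pvVal g0 u)
    (hub : ∀ u, pvValidU R C u → pvVal g0 u ≠ -1 → pvVal g0 u ≤ t + 1) (ht : 0 ≤ t) :
    pvSA heights R C g0 e t (pvNbrs e)
      (pvAVisit heights (R : Int) (C : Int) g0 e.1 e.2 t) := by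
  have hinit : pvSA heights R C g0 e t [] (g0, []) := by
    refine ⟨hsh, fun u _ _ => rfl, hlb, ?_, by simp, by simp, by simp⟩
    · intro u hu hch; exact absurd rfl hch
  have hfold : ∀ (qs : List (Int × Int)) (P : List (Int × Int))
      (st : List (List Int) × List (Int × Int)), pvSA heights R C g0 e t P st →
      pvSA heights R C g0 e t (P ++ qs)
        (qs.foldl (pvAStep heights (R : Int) (C : Int) e.1 e.2 t) st) := by
    intro qs
    induction qs with
    | nil => intro P st h; simpa using h
    | cons q qs ih =>
      intro P st h
      have hstep := pvSA_step (heights := heights) (e := e) q hub ht h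
      have h' := ih (P ++ [q]) _ hstep
      rw [List.foldl_cons]
      rw [show P ++ q :: qs = (P ++ [q]) ++ qs by simp]
      exact h'
  have hres := hfold [(e.1 + -1, e.2 + 0), (e.1 + 1, e.2 + 0), (e.1 + 0, e.2 + -1),
    (e.1 + 0, e.2 + 1)] [] (g0, []) hinit
  have hql : ([(e.1 + -1, e.2 + 0), (e.1 + 1, e.2 + 0), (e.1 + 0, e.2 + -1),
      (e.1 + 0, e.2 + 1)] : List (Int × Int)) = pvNbrs e := by
    simp only [show e.1 + -1 = e.1 - 1 from by ring, show e.2 + (0 : Int) = e.2 from by ring,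
      show e.2 + -1 = e.2 - 1 from by ring, show e.1 + (0 : Int) = e.1 from by ring, pvNbrs]
  rw [hql] at hres
  simp only [List.nil_append] at hres
  have hbridge : pvAVisit heights (R : Int) (C : Int) g0 e.1 e.2 t
      = (pvNbrs e).foldl (pvAStep heights (R : Int) (C : Int) e.1 e.2 t) (g0, []) := by
    rw [← hql]
    have hmap : ([(e.1 + -1, e.2 + 0), (e.1 + 1, e.2 + 0), (e.1 + 0, e.2 + -1),
        (e.1 + 0, e.2 + 1)] : List (Int × Int))
        = ([((-1 : Int), (0 : Int)), (1, 0), (0, -1), (0, 1)]).map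
            (fun d => (e.1 + d.1, e.2 + d.2)) := by
      simp
    rw [hmap, List.foldl_map]
    rfl
  rw [hbridge]
  exact hres

-- A's loop invariant: the queue splits into a level-t block Q1 and a level-(t+1) block Q2
def pvIA (heights : List (List Int)) (R C : Nat) (sr sc : Int)
    (g : List (List Int)) (Q1 Q2 : List (Int × Int)) (t : Int) : Prop :=
  pvSh R C g ∧ 0 ≤ t ∧
  (∀ u, pvValidU R C u → -1 ≤ pvVal g u) ∧
  pvVal g (pvSrcSlot R C sr sc) = 0 ∧
  (∀ u, pvValidU R C u → pvVal g u = 0 → u = pvSrcSlot R C sr sc) ∧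
  (∀ u, pvValidU R C u → pvVal g u ≠ -1 → pvVal g u ≤ t + 1) ∧
  pvSupp heights R C sr sc g ∧
  (∀ e ∈ Q1, pvEntry R C sr sc e ∧ pvVal g (pvSlotOf R C e) = t) ∧
  (∀ e ∈ Q2, pvEntry R C sr sc e ∧ pvVal g (pvSlotOf R C e) = t + 1) ∧
  (∀ u, pvValidU R C u → pvVal g u ≠ -1 →
    (∃ e ∈ Q1 ++ Q2, pvSlotOf R C e = u) ∨ pvOBL heights R C sr sc g u)

-- one pop of A's loop preserves the invariant and strictly decreases 2·dry + queue-length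
lemma pvIA_step {heights : List (List Int)} {R C : Nat} {sr sc : Int}
    {g : List (List Int)} {e : Int × Int} {Q1' Q2 : List (Int × Int)} {t : Int}
    (hsrc : pvInR R C (sr, sc))
    (hIA : pvIA heights R C sr sc g (e :: Q1') Q2 t) :
    pvRead g e.1 e.2 = t ∧
    pvIA heights R C sr sc
      (pvAVisit heights (R : Int) (C : Int) g e.1 e.2 t).1 Q1'
      (Q2 ++ (pvAVisit heights (R : Int) (C : Int) g e.1 e.2 t).2) t ∧
    pvCount (pvAVisit heights (R : Int) (C : Int) g e.1 e.2 t).1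
      + (pvAVisit heights (R : Int) (C : Int) g e.1 e.2 t).2.length = pvCount g := by
  obtain ⟨i1, i2, i3, i4, i5, i6, i7, i8, i9, i10⟩ := hIA
  have hE := i8 e List.mem_cons_self
  obtain ⟨hent, hval⟩ := hE
  obtain ⟨hcanon, hinR, hvalid⟩ := pvEntry_canon hsrc hent
  have hread : pvRead g e.1 e.2 = t := by
    rw [pvRead_eq i1 hinR]; exact hval
  have hSA := pvAVisit_SA (heights := heights) e i1 i3 i6 i2
  obtain ⟨s1, s2, slb, s3, s4, s5, s6⟩ := hSA
  set st := pvAVisit heights (R : Int) (C : Int) g e.1 e.2 t with hst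
  have hsrcslot : pvValidU R C (pvSrcSlot R C sr sc) := pvValidU_slotOf hsrc
  -- e's own slot keeps value t
  have hkeep : pvVal st.1 (pvSlotOf R C e) = t := by
    rw [s2 _ hvalid (by omega)]; exact hval
  -- news entries are fresh nonneg cells, not the source
  have hnews : ∀ p ∈ st.2, pvEntry R C sr sc p ∧ pvVal st.1 (pvSlotOf R C p) = t + 1 := by
    intro p hp
    obtain ⟨hpP, hok, hfresh, hnow⟩ := s5 p hp
    have hslot : pvSlotOf R C p = pvToSlot p := pvSlotOf_nonneg hok.1 hok.2.2.1
    have hpv : pvValidU R C (pvToSlot p) := by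
      rw [← hslot]; exact pvValidU_slotOf (pvOk_inR hok)
    refine ⟨Or.inr ⟨hok.1, hok.2.1, hok.2.2.1, hok.2.2.2.1, ?_⟩, by rw [hslot]; exact hnow⟩
    rw [hslot]
    intro hcon
    rw [hcon] at hfresh
    omega
  refine ⟨hread, ⟨s1, i2, slb, ?_, ?_, ?_, ?_, ?_, ?_, ?_⟩, s6⟩
  · rw [s2 _ hsrcslot (by omega)]; exact i4
  · intro u hu h0
    by_cases hch : pvVal st.1 u = pvVal g u
    · exact i5 u hu (by rw [← hch]; exact h0)
    · obtain ⟨_, hnew, _⟩ := s3 u hu hch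
      omega
  · intro u hu hw
    by_cases hch : pvVal st.1 u = pvVal g u
    · rw [hch]; exact i6 u hu (by rw [← hch]; exact hw)
    · exact le_of_eq (s3 u hu hch).2.1
  · -- support
    intro v hv h1
    by_cases hch : pvVal st.1 v = pvVal g v
    · obtain ⟨u, hu, hedge, hval'⟩ := i7 v hv (by rw [← hch]; exact h1)
      have huw : pvVal g u ≠ -1 := by rw [hval']; rw [hch] at h1; omega
      refine ⟨u, hu, hedge, ?_⟩
      rw [s2 u hu huw, hval', hch]
    · obtain ⟨hfresh, hnew, p, hp, hps⟩ := s3 v hv hch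
      obtain ⟨hpP, hok, _, _⟩ := s5 p hp
      refine ⟨pvSlotOf R C e, hvalid, ?_, ?_⟩
      · exact ⟨p, by rw [hcanon]; exact hpP, by rw [hcanon]; exact hok, hps⟩
      · rw [hkeep, hnew]; ring
  · intro e' he'
    obtain ⟨hent', hval'⟩ := i8 e' (List.mem_cons_of_mem _ he')
    have hv' : pvValidU R C (pvSlotOf R C e') := (pvEntry_canon hsrc hent').2.2
    exact ⟨hent', by rw [s2 _ hv' (by omega)]; exact hval'⟩
  · intro e' he'
    rcases List.mem_append.mp he' with hm | hm
    · obtain ⟨hent', hval'⟩ := i9 e' hm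
      have hv' : pvValidU R C (pvSlotOf R C e') := (pvEntry_canon hsrc hent').2.2
      exact ⟨hent', by rw [s2 _ hv' (by omega)]; exact hval'⟩
    · exact hnews e' hm
  · -- obligations
    intro u hu hw
    by_cases hch : pvVal st.1 u = pvVal g u
    · rcases i10 u hu (by rw [← hch]; exact hw) with ⟨e', he', hes⟩ | hobl
      · rw [List.cons_append] at he'
        rcases List.mem_cons.mp he' with heq | hrest
        · -- the witness entry was e itself: its slot is now fully relaxed
          subst heq
          right
          intro v hedge
          obtain ⟨q, hqm, hqok, rfl⟩ := hedge
          rw [← hes, hcanon] at hqm hqok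
          have h4 := s4 q hqm hqok
          refine ⟨h4.1, ?_⟩
          rw [← hes, hkeep]
          have := h4.2
          omega
        · rcases List.mem_append.mp hrest with h | h
          · exact Or.inl ⟨e', List.mem_append.mpr (Or.inl h), hes⟩
          · exact Or.inl ⟨e', List.mem_append.mpr (Or.inr (List.mem_append.mpr (Or.inl h))), hes⟩
      · -- previously relaxed slots stay relaxed: values of wet cells do not change
        right
        intro v hedge
        obtain ⟨hvw, hvle⟩ := hobl v hedge
        have hvv : pvValidU R C v := pvEdge_valid hedge
        rw [s2 v hvv hvw, hch]
        exact ⟨hvw, hvle⟩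
    · obtain ⟨hfresh, hnew, p, hp, hps⟩ := s3 u hu hch
      left
      obtain ⟨hpP, hok, _, _⟩ := s5 p hp
      refine ⟨p, List.mem_append.mpr (Or.inr (List.mem_append.mpr (Or.inr hp))), ?_⟩
      rw [pvSlotOf_nonneg hok.1 hok.2.2.1, hps]

-- an empty queue turns the invariant into the postcondition
lemma pvIA_empty {heights : List (List Int)} {R C : Nat} {sr sc : Int}
    {g : List (List Int)} {t : Int}
    (hIA : pvIA heights R C sr sc g [] [] t) : pvPost heights R C sr sc g := by
  obtain ⟨i1, i2, i3, i4, i5, i6, i7, i8, i9, i10⟩ := hIA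
  refine ⟨i1, i3, i4, i5, ?_, i7⟩
  intro u hu hw
  rcases i10 u hu hw with ⟨e', he', _⟩ | hobl
  · simp at he'
  · exact hobl

-- the level shift: when the level-t block is exhausted the queue is one block up
lemma pvIA_shift {heights : List (List Int)} {R C : Nat} {sr sc : Int}
    {g : List (List Int)} {Q2 : List (Int × Int)} {t : Int}
    (hIA : pvIA heights R C sr sc g [] Q2 t) : pvIA heights R C sr sc g Q2 [] (t + 1) := by
  obtain ⟨i1, i2, i3, i4, i5, i6, i7, i8, i9, i10⟩ := hIA
  refine ⟨i1, by omega, i3, i4, i5, ?_, i7, i9, by simp, ?_⟩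
  · intro u hu hw
    have := i6 u hu hw
    omega
  · intro u hu hw
    rcases i10 u hu hw with ⟨e', he', hes⟩ | hobl
    · exact Or.inl ⟨e', by simpa using he', hes⟩
    · exact Or.inr hobl

-- A's loop: from the invariant, the result satisfies the postcondition
lemma pvALoop_post (heights : List (List Int)) (R C : Nat) (sr sc : Int)
    (hsrc : pvInR R C (sr, sc)) :
    ∀ (M : Nat) (fuel : Nat) (g : List (List Int)) (Q1 Q2 : List (Int × Int)) (t : Int),
      pvIA heights R C sr sc g Q1 Q2 t →
      2 * pvCount g + (Q1 ++ Q2).length ≤ M → M < fuel →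
      pvPost heights R C sr sc (pvALoop heights (R : Int) (C : Int) fuel g (Q1 ++ Q2)) := by
  intro M
  induction M with
  | zero =>
    intro fuel g Q1 Q2 t hIA hM hf
    obtain ⟨fuel', rfl⟩ : ∃ k, fuel = k + 1 := ⟨fuel - 1, by omega⟩
    have h1 : Q1 = [] := by
      cases Q1 with
      | nil => rfl
      | cons a l => simp at hM
    have h2 : Q2 = [] := by
      cases Q2 with
      | nil => rfl
      | cons a l => subst h1; simp at hM
    subst h1; subst h2
    exact pvIA_empty hIA
  | succ M ih =>
    intro fuel g Q1 Q2 t hIA hM hf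
    obtain ⟨fuel', rfl⟩ : ∃ k, fuel = k + 1 := ⟨fuel - 1, by omega⟩
    have main : ∀ (e : Int × Int) (Q1' Q2' : List (Int × Int)) (t' : Int),
        pvIA heights R C sr sc g (e :: Q1') Q2' t' →
        2 * pvCount g + ((e :: Q1') ++ Q2').length ≤ M + 1 →
        pvPost heights R C sr sc
          (pvALoop heights (R : Int) (C : Int) (fuel' + 1) g ((e :: Q1') ++ Q2')) := by
      intro e Q1' Q2' t' hIA' hM'
      obtain ⟨r, c⟩ := e
      obtain ⟨hread, hIA2, hcnt⟩ := pvIA_step hsrc hIA'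
      simp only at hread hIA2 hcnt
      rw [List.cons_append]
      show pvPost heights R C sr sc
        (pvALoop heights (R : Int) (C : Int) fuel'
          (pvAVisit heights (R : Int) (C : Int) g r c (pvRead g r c)).1
          ((Q1' ++ Q2') ++ (pvAVisit heights (R : Int) (C : Int) g r c (pvRead g r c)).2))
      rw [hread, List.append_assoc]
      apply ih fuel' _ Q1' _ t' hIA2 _ (by omega)
      have hlen : ((r, c) :: Q1' ++ Q2').length = Q1'.length + Q2'.length + 1 := by
        simp
      rw [hlen] at hM'
      simp only [List.length_append]
      omega
    cases Q1 with
    | cons e Q1' => exact main e Q1' Q2 t hIA hM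
    | nil =>
      cases Q2 with
      | nil => exact pvIA_empty hIA
      | cons q Q2' =>
        have hIA' := pvIA_shift hIA
        have : ([] : List (Int × Int)) ++ (q :: Q2') = (q :: Q2') ++ [] := by simp
        rw [this]
        apply main q Q2' [] (t + 1) hIA'
        simpa using hM

-- ---------- B's label-correcting loop: invariant and convergence ----------

-- the body of Source B's neighbour loop, on neighbour pair q of the popped pair (er, ec)
def pvBStep (heights : List (List Int)) (rows cols er ec d : Int)
    (st : List (List Int) × List (Int × Int)) (q : Int × Int) :
    List (List Int) × List (Int × Int) :=
  if 0 ≤ q.1 ∧ q.1 < rows ∧ 0 ≤ q.2 ∧ q.2 < cols ∧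
      pvRead heights q.1 q.2 ≤ pvRead heights er ec ∧
      (pvRead st.1 q.1 q.2 = -1 ∨ d < pvRead st.1 q.1 q.2) then
    (pvWrite st.1 q.1 q.2 d, (q.1, q.2) :: st.2)
  else st

-- state of B's neighbour fold over processed prefix P, relative to the grid g0 at the pop
def pvSB (heights : List (List Int)) (R C : Nat) (sr sc : Int) (g0 : List (List Int))
    (e : Int × Int) (d : Int) (P : List (Int × Int)) (g : List (List Int))
    (news : List (Int × Int)) : Prop :=
  pvSh R C g ∧
  (∀ u, pvValidU R C u → pvVal g u = pvVal g0 u ∨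
    (pvVal g u = d ∧ (pvVal g0 u = -1 ∨ d < pvVal g0 u) ∧ ∃ p ∈ news, u = pvToSlot p)) ∧
  (∀ q ∈ P, pvOk heights R C e q → pvVal g (pvToSlot q) ≠ -1 ∧ pvVal g (pvToSlot q) ≤ d) ∧
  (∀ p ∈ news, p ∈ P ∧ pvOk heights R C e p ∧ pvVal g (pvToSlot p) ≠ -1 ∧
    pvToSlot p ≠ pvSrcSlot R C sr sc) ∧
  pvVal g (pvSrcSlot R C sr sc) = pvVal g0 (pvSrcSlot R C sr sc) ∧
  pvPot R C g + news.length ≤ pvPot R C g0 ∧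
  pvCount g ≤ pvCount g0 ∧
  (∀ u, pvValidU R C u → pvVal g u ≠ -1 → pvVal g u + pvCount g + 1 ≤ ((R * C : Nat) : Int)) ∧
  (∀ u, pvValidU R C u → -1 ≤ pvVal g u)

lemma pvSB_step {heights : List (List Int)} {R C : Nat} {sr sc : Int} {g0 : List (List Int)}
    {e : Int × Int} {d : Int} {P : List (Int × Int)} {g : List (List Int)}
    {news : List (Int × Int)} (q : Int × Int) (stk0 : List (Int × Int))
    (hd1 : 1 ≤ d) (hdc : d + (pvCount g0 : Int) ≤ ((R * C : Nat) : Int))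
    (hg0src : pvVal g0 (pvSrcSlot R C sr sc) = 0)
    (h : pvSB heights R C sr sc g0 e d P g news) :
    ∃ g' news', pvBStep heights (R : Int) (C : Int) e.1 e.2 d (g, news ++ stk0) q
        = (g', news' ++ stk0) ∧ pvSB heights R C sr sc g0 e d (P ++ [q]) g' news' := by
  obtain ⟨r1, r2, r3, r4, r5, r6, r7, r8, r9⟩ := h
  rw [pvBStep]
  by_cases hg : 0 ≤ q.1 ∧ q.1 < (R : Int) ∧ 0 ≤ q.2 ∧ q.2 < (C : Int) ∧
      pvRead heights q.1 q.2 ≤ pvRead heights e.1 e.2 ∧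
      (pvRead g q.1 q.2 = -1 ∨ d < pvRead g q.1 q.2)
  · rw [if_pos hg]
    obtain ⟨h1, h2, h3, h4, h5, h6⟩ := hg
    have hqin : pvInR R C q := ⟨by omega, h2, by omega, h4⟩
    have hok : pvOk heights R C e q := ⟨h1, h2, h3, h4, h5⟩
    have hslot : pvSlotOf R C q = pvToSlot q := pvSlotOf_nonneg h1 h3
    set w := pvToSlot q with hw
    have hwv : pvValidU R C w := by rw [← hslot]; exact pvValidU_slotOf hqin
    have hgw : pvVal g w = -1 ∨ d < pvVal g w := by
      rw [← hslot, ← pvRead_eq r1 hqin]; exact h6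
    -- the value at w before the write was carried over from g0
    have hold : pvVal g w = pvVal g0 w := by
      rcases r2 w hwv with hc | ⟨hc1, _, _⟩
      · exact hc
      · rw [hc1] at hgw; omega
    have hnsrc : w ≠ pvSrcSlot R C sr sc := by
      intro hcon
      rw [hcon, r5, hg0src] at hgw
      omega
    have hwr : pvWrite g q.1 q.2 d = pvNWrite g w.1 w.2 d := by
      rw [pvWrite_eq r1 hqin d, ← hslot]
      rfl
    have hval : ∀ u, pvVal (pvWrite g q.1 q.2 d) u = if u = w then d else pvVal g u := by
      intro u; rw [hwr]; exact pvVal_pvNWrite r1 hwv d u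
    have hpot := pvPot_pvNWrite (v := d) r1 hwv
    rw [← hwr] at hpot
    refine ⟨pvWrite g q.1 q.2 d, (q.1, q.2) :: news, by rw [List.cons_append], ?_⟩
    have hcnt : pvCount (pvWrite g q.1 q.2 d) ≤ pvCount g ∧
        (pvVal g w = -1 → pvCount (pvWrite g q.1 q.2 d) + 1 = pvCount g) := by
      rcases hgw with hc | hc
      · have := pvCount_pvNWrite (v := d) r1 hwv hc (by omega)
        rw [← hwr] at this
        exact ⟨by omega, fun _ => this⟩
      · have hne : pvVal g w ≠ -1 := by omega
        have := pvCount_pvNWrite_wet (v := d) r1 hwv hne (by omega)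
        rw [← hwr] at this
        exact ⟨by omega, fun hcc => absurd hcc hne⟩
    refine ⟨by rw [hwr]; exact pvSh_pvNWrite r1 w.1 w.2 d hwv.1, ?_, ?_, ?_, ?_, ?_, ?_, ?_, ?_⟩
    · intro u hu
      rw [hval u]
      split_ifs with hc
      · subst hc
        rw [hold] at hgw
        exact Or.inr ⟨rfl, hgw, ⟨(q.1, q.2), by simp, by simp [hw, pvToSlot]⟩⟩
      · rcases r2 u hu with hc2 | ⟨hc2, hc3, p, hp, hps⟩
        · exact Or.inl hc2
        · exact Or.inr ⟨hc2, hc3, p, by simp [hp], hps⟩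
    · intro q' hq' hok'
      rcases List.mem_append.mp hq' with hm | hm
      · have old := r3 q' hm hok'
        rw [hval (pvToSlot q')]
        split_ifs with hc
        · constructor <;> omega
        · exact old
      · simp only [List.mem_singleton] at hm
        subst hm
        rw [hval (pvToSlot q'), if_pos (by rw [hw])]
        constructor <;> omega
    · intro p hp
      rcases List.mem_cons.mp hp with hm | hm
      · subst hm
        refine ⟨by simp, hok, ?_, by rw [show pvToSlot ((q.1, q.2) : Int × Int) = w from by simp [hw, pvToSlot]]; exact hnsrc⟩
        rw [show pvToSlot ((q.1, q.2) : Int × Int) = w from by simp [hw, pvToSlot], hval w, if_pos rfl]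
        omega
      · obtain ⟨a1, a2, a3, a4⟩ := r4 p hm
        refine ⟨by simp [a1], a2, ?_, a4⟩
        rw [hval (pvToSlot p)]
        split_ifs with hc
        · omega
        · exact a3
    · rw [hval _, if_neg (Ne.symm hnsrc)]
      exact r5
    · -- potential decreases by at least one per write
      have hKd : d ≤ ((R * C : Nat) : Int) := by
        have : (0 : Int) ≤ (pvCount g0 : Int) := by positivity
        omega
      have hdm1 : d ≠ -1 := by omega
      rcases hgw with hc | hc
      · rw [hc, if_pos rfl, if_neg hdm1] at hpot
        simp only [List.length_cons]
        push_cast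
        omega
      · have hne : pvVal g w ≠ -1 := by omega
        rw [if_neg hne, if_neg hdm1] at hpot
        simp only [List.length_cons]
        push_cast
        omega
    · exact le_trans hcnt.1 r7
    · intro u hu huw
      rw [hval u] at huw ⊢
      split_ifs with hc
      · rcases hgw with hcc | hcc
        · have := hcnt.2 hcc
          have : (pvCount (pvWrite g q.1 q.2 d) : Int) + 1 = (pvCount g : Int) := by
            exact_mod_cast this
          have h7 : (pvCount g : Int) ≤ (pvCount g0 : Int) := by exact_mod_cast r7
          omega
        · have hne : pvVal g w ≠ -1 := by omega
          have h8 := r8 w hwv hne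
          have := pvCount_pvNWrite_wet (v := d) r1 hwv hne (by omega)
          rw [← hwr] at this
          have : (pvCount (pvWrite g q.1 q.2 d) : Int) = (pvCount g : Int) := by
            exact_mod_cast this
          omega
      · have h8 := r8 u hu (by rw [if_neg hc] at huw; exact huw)
        have h9 : (pvCount (pvWrite g q.1 q.2 d) : Int) ≤ (pvCount g : Int) := by
          exact_mod_cast hcnt.1
        omega
    · intro u hu
      rw [hval u]
      split_ifs with hc
      · omega
      · exact r9 u hu
  · rw [if_neg hg]
    refine ⟨g, news, rfl, r1, r2, ?_, ?_, r5, r6, r7, r8, r9⟩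
    · intro q' hq' hok'
      rcases List.mem_append.mp hq' with hm | hm
      · exact r3 q' hm hok'
      · simp only [List.mem_singleton] at hm
        subst hm
        have hqin : pvInR R C q' := pvOk_inR hok'
        have hnw : ¬(pvRead g q'.1 q'.2 = -1 ∨ d < pvRead g q'.1 q'.2) := by
          intro hcon
          obtain ⟨h1, h2, h3, h4, h5⟩ := hok'
          exact hg ⟨h1, h2, h3, h4, h5, hcon⟩
        push_neg at hnw
        have hslot : pvSlotOf R C q' = pvToSlot q' := pvSlotOf_nonneg hok'.1 hok'.2.2.1
        rw [pvRead_eq r1 hqin, hslot] at hnw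
        exact ⟨hnw.1, hnw.2⟩
    · intro p hp
      obtain ⟨a1, a2, a3, a4⟩ := r4 p hp
      exact ⟨by simp [a1], a2, a3, a4⟩

lemma pvSB_fold {heights : List (List Int)} {R C : Nat} {sr sc : Int} {g0 : List (List Int)}
    {e : Int × Int} {d : Int} (stk0 : List (Int × Int))
    (hd1 : 1 ≤ d) (hdc : d + (pvCount g0 : Int) ≤ ((R * C : Nat) : Int))
    (hg0src : pvVal g0 (pvSrcSlot R C sr sc) = 0) :
    ∀ (qs : List (Int × Int)) (P : List (Int × Int)) (g : List (List Int))
      (news : List (Int × Int)), pvSB heights R C sr sc g0 e d P g news →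
      ∃ g' news', qs.foldl (pvBStep heights (R : Int) (C : Int) e.1 e.2 d) (g, news ++ stk0)
          = (g', news' ++ stk0) ∧ pvSB heights R C sr sc g0 e d (P ++ qs) g' news' := by
  intro qs
  induction qs with
  | nil =>
    intro P g news h
    exact ⟨g, news, rfl, by simpa using h⟩
  | cons q qs ih =>
    intro P g news h
    obtain ⟨g1, n1, he1, hs1⟩ := pvSB_step q stk0 hd1 hdc hg0src h
    obtain ⟨g', n', he', hs'⟩ := ih (P ++ [q]) g1 n1 hs1
    refine ⟨g', n', ?_, ?_⟩
    · rw [List.foldl_cons, he1, he']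
    · simpa using hs'

-- B's loop invariant, relative to A's final grid W
def pvJB (heights : List (List Int)) (R C : Nat) (sr sc : Int)
    (W g : List (List Int)) (stk : List (Int × Int)) : Prop :=
  pvSh R C g ∧
  (∀ u, pvValidU R C u → -1 ≤ pvVal g u) ∧
  (∀ u, pvValidU R C u → pvVal g u ≠ -1 → pvVal g u + pvCount g + 1 ≤ ((R * C : Nat) : Int)) ∧
  pvVal g (pvSrcSlot R C sr sc) = 0 ∧
  (∀ u, pvValidU R C u → pvVal g u ≠ -1 → pvVal W u ≠ -1 ∧ pvVal W u ≤ pvVal g u) ∧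
  (∀ e ∈ stk, pvEntry R C sr sc e ∧ pvVal g (pvSlotOf R C e) ≠ -1) ∧
  (∀ u, pvValidU R C u → pvVal g u ≠ -1 →
    (∃ e ∈ stk, pvSlotOf R C e = u) ∨ pvOBL heights R C sr sc g u)

lemma pvJB_step {heights : List (List Int)} {R C : Nat} {sr sc : Int}
    {W g : List (List Int)} {e : Int × Int} {stk' : List (Int × Int)}
    (hsrc : pvInR R C (sr, sc)) (hpostW : pvPost heights R C sr sc W)
    (hJB : pvJB heights R C sr sc W g (e :: stk')) :
    ∃ g' news,
      (pvNbrs e).foldl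
        (pvBStep heights (R : Int) (C : Int) e.1 e.2 (pvRead g e.1 e.2 + 1)) (g, stk')
        = (g', news ++ stk') ∧
      pvJB heights R C sr sc W g' (news ++ stk') ∧
      2 * pvPot R C g' + ((news ++ stk').length : Int) + 1
        ≤ 2 * pvPot R C g + ((e :: stk').length : Int) := by
  obtain ⟨j1, j2, j3, j4, j5, j6, j7⟩ := hJB
  obtain ⟨hentE, hwetE⟩ := j6 e List.mem_cons_self
  obtain ⟨hcanon, hinR, hvalid⟩ := pvEntry_canon hsrc hentE
  have hread : pvRead g e.1 e.2 = pvVal g (pvSlotOf R C e) := pvRead_eq j1 hinR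
  set d := pvRead g e.1 e.2 + 1 with hd
  have hveE : 0 ≤ pvVal g (pvSlotOf R C e) := by
    have := j2 _ hvalid
    omega
  have hd1 : 1 ≤ d := by rw [hd, hread]; omega
  have hdval : d = pvVal g (pvSlotOf R C e) + 1 := by rw [hd, hread]
  have hdc : d + (pvCount g : Int) ≤ ((R * C : Nat) : Int) := by
    have := j3 _ hvalid hwetE
    omega
  have hinit : pvSB heights R C sr sc g e d [] g [] := by
    refine ⟨j1, fun u _ => Or.inl rfl, by simp, by simp, rfl, by simp, le_refl _, j3, j2⟩
  obtain ⟨g', news, heq, hSB⟩ := pvSB_fold stk' hd1 hdc j4 (pvNbrs e) [] g [] hinit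
  obtain ⟨r1, r2, r3, r4, r5, r6, r7, r8, r9⟩ := hSB
  simp only [List.nil_append] at heq r3 r4
  -- wetness is preserved and labels never grow on wet cells
  have hmono : ∀ u, pvValidU R C u → pvVal g u ≠ -1 →
      pvVal g' u ≠ -1 ∧ pvVal g' u ≤ pvVal g u := by
    intro u hu hw
    rcases r2 u hu with hc | ⟨hc1, hc2, _⟩
    · rw [hc]; exact ⟨hw, le_refl _⟩
    · rw [hc1]; constructor <;> omega
  -- e's own slot did not change
  have hkeep : pvVal g' (pvSlotOf R C e) = pvVal g (pvSlotOf R C e) := by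
    rcases r2 _ hvalid with hc | ⟨hc1, hc2, _⟩
    · exact hc
    · omega
  refine ⟨g', news, heq, ⟨r1, r9, r8, by rw [r5]; exact j4, ?_, ?_, ?_⟩, ?_⟩
  · -- lower bound against W
    intro u hu hw
    rcases r2 u hu with hc | ⟨hc1, hc2, p, hp, hps⟩
    · rw [hc] at hw ⊢
      exact j5 u hu hw
    · obtain ⟨hpP, hok, _, _⟩ := r4 p hp
      have hWe := j5 _ hvalid hwetE
      have hedge : pvEdge heights R C sr sc (pvSlotOf R C e) u := by
        refine ⟨p, ?_, ?_, hps⟩ <;> rw [hcanon]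
        · exact hpP
        · exact hok
      obtain ⟨_, _, _, _, hcons, _⟩ := hpostW
      have hOW := hcons _ hvalid hWe.1 u hedge
      refine ⟨hOW.1, ?_⟩
      rw [hc1, hdval]
      have := hOW.2
      have := hWe.2
      omega
  · -- stack entries
    intro e' he'
    rcases List.mem_append.mp he' with hm | hm
    · obtain ⟨hpP, hok, hwet', hnsrc⟩ := r4 e' hm
      have hslot : pvSlotOf R C e' = pvToSlot e' := pvSlotOf_nonneg hok.1 hok.2.2.1
      refine ⟨Or.inr ⟨hok.1, hok.2.1, hok.2.2.1, hok.2.2.2.1, by rw [hslot]; exact hnsrc⟩, ?_⟩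
      rw [hslot]; exact hwet'
    · obtain ⟨hent', hwet'⟩ := j6 e' (List.mem_cons_of_mem _ hm)
      have hv' : pvValidU R C (pvSlotOf R C e') := (pvEntry_canon hsrc hent').2.2
      exact ⟨hent', (hmono _ hv' hwet').1⟩
  · -- obligations
    intro u hu hw
    rcases r2 u hu with hc | ⟨hc1, hc2, p, hp, hps⟩
    · -- value unchanged
      have hwold : pvVal g u ≠ -1 := by rw [← hc]; exact hw
      rcases j7 u hu hwold with ⟨e'', he'', hes⟩ | hobl
      · rcases List.mem_cons.mp he'' with heq' | hrest
        · -- the popped entry: now fully relaxed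
          subst heq'
          right
          intro v hedge
          obtain ⟨q, hqm, hqok, rfl⟩ := hedge
          rw [← hes, hcanon] at hqm hqok
          have h3 := r3 q hqm hqok
          refine ⟨h3.1, ?_⟩
          rw [← hes, hkeep, ← hdval]
          exact h3.2
        · exact Or.inl ⟨e'', List.mem_append.mpr (Or.inr hrest), hes⟩
      · -- an already relaxed slot stays relaxed: labels only shrink
        right
        intro v hedge
        obtain ⟨hvw, hvle⟩ := hobl v hedge
        have hvv : pvValidU R C v := pvEdge_valid hedge
        obtain ⟨hvw', hvle'⟩ := hmono v hvv hvw
        refine ⟨hvw', ?_⟩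
        rw [hc]
        omega
    · -- newly written: its pair is on the stack
      obtain ⟨hpP, hok, _, _⟩ := r4 p hp
      exact Or.inl ⟨p, List.mem_append.mpr (Or.inl hp),
        by rw [pvSlotOf_nonneg hok.1 hok.2.2.1, hps]⟩
  · -- the measure decreases
    simp only [List.length_append, List.length_cons]
    push_cast
    omega

-- with an empty stack the labels agree with W everywhere
lemma pvFinal {heights : List (List Int)} {R C : Nat} {sr sc : Int} {W g : List (List Int)}
    (hpostW : pvPost heights R C sr sc W)
    (hJB : pvJB heights R C sr sc W g []) :
    ∀ u, pvValidU R C u → pvVal g u = pvVal W u := by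
  obtain ⟨p1, p2, p3, p4, p5, p6⟩ := hpostW
  obtain ⟨j1, j2, j3, j4, j5, j6, j7⟩ := hJB
  have hstab : ∀ u, pvValidU R C u → pvVal g u ≠ -1 → pvOBL heights R C sr sc g u := by
    intro u hu hw
    rcases j7 u hu hw with ⟨e', he', _⟩ | hobl
    · simp at he'
    · exact hobl
  have hle : ∀ dn : Nat, ∀ v, pvValidU R C v → pvVal W v = (dn : Int) →
      pvVal g v ≠ -1 ∧ pvVal g v ≤ (dn : Int) := by
    intro dn
    induction dn using Nat.strong_induction_on with
    | _ dn ih =>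
      intro v hv hWv
      cases dn with
      | zero =>
        have hv0 : v = pvSrcSlot R C sr sc := p4 v hv (by exact_mod_cast hWv)
        subst hv0
        rw [j4]
        exact ⟨by omega, by exact_mod_cast le_refl 0⟩
      | succ n =>
        obtain ⟨u, hu, hedge, huval⟩ := p6 v hv (by rw [hWv]; exact_mod_cast Nat.succ_le_succ (Nat.zero_le n))
        have huW : pvVal W u = (n : Int) := by
          rw [huval, hWv]
          push_cast
          ring
        obtain ⟨huw, hule⟩ := ih n (by omega) u hu huW
        obtain ⟨hvw, hvle⟩ := hstab u hu huw v hedge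
        refine ⟨hvw, ?_⟩
        push_cast
        omega
  intro u hu
  by_cases hg : pvVal g u = -1
  · by_cases hWw : pvVal W u = -1
    · rw [hg, hWw]
    · obtain ⟨dn, hdn⟩ : ∃ dn : Nat, pvVal W u = (dn : Int) :=
        ⟨(pvVal W u).toNat, by
          have := p2 u hu
          rw [Int.toNat_of_nonneg (by omega)]⟩
      obtain ⟨hwet, _⟩ := hle dn u hu hdn
      exact absurd hg hwet
  · obtain ⟨hWw, hWle⟩ := j5 u hu hg
    obtain ⟨dn, hdn⟩ : ∃ dn : Nat, pvVal W u = (dn : Int) :=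
      ⟨(pvVal W u).toNat, by
        have := p2 u hu
        rw [Int.toNat_of_nonneg (by omega)]⟩
    obtain ⟨_, hle'⟩ := hle dn u hu hdn
    omega

-- B's loop converges to W
lemma pvBLoop_run (heights : List (List Int)) (R C : Nat) (sr sc : Int)
    (W : List (List Int)) (hsrc : pvInR R C (sr, sc))
    (hpostW : pvPost heights R C sr sc W) :
    ∀ (M : Nat) (fuel : Nat) (g : List (List Int)) (stk : List (Int × Int)),
      pvJB heights R C sr sc W g stk →
      2 * pvPot R C g + (stk.length : Int) + 1 ≤ (M : Int) → M < fuel →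
      pvSh R C (pvBLoop heights (R : Int) (C : Int) fuel g stk) ∧
      ∀ u, pvValidU R C u →
        pvVal (pvBLoop heights (R : Int) (C : Int) fuel g stk) u = pvVal W u := by
  intro M
  induction M with
  | zero =>
    intro fuel g stk hJB hM hf
    exfalso
    have hpos := pvPot_nonneg hJB.2.1 hJB.1
    have : (0 : Int) ≤ (stk.length : Int) := by positivity
    omega
  | succ M ih =>
    intro fuel g stk hJB hM hf
    obtain ⟨fuel', rfl⟩ : ∃ k, fuel = k + 1 := ⟨fuel - 1, by omega⟩
    cases stk with
    | nil =>
      exact ⟨hJB.1, pvFinal hpostW hJB⟩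
    | cons e stk' =>
      obtain ⟨r, c⟩ := e
      obtain ⟨g', news, heq, hJB', hmeas⟩ := pvJB_step hsrc hpostW hJB
      simp only at heq hJB' hmeas
      have hstep : pvBLoop heights (R : Int) (C : Int) (fuel' + 1) g ((r, c) :: stk')
          = pvBLoop heights (R : Int) (C : Int) fuel' g' (news ++ stk') := by
        have hdefeq : pvBLoop heights (R : Int) (C : Int) (fuel' + 1) g ((r, c) :: stk')
            = pvBLoop heights (R : Int) (C : Int) fuel'
                ((pvNbrs (r, c)).foldl
                  (pvBStep heights (R : Int) (C : Int) r c (pvRead g r c + 1)) (g, stk')).1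
                ((pvNbrs (r, c)).foldl
                  (pvBStep heights (R : Int) (C : Int) r c (pvRead g r c + 1)) (g, stk')).2 := rfl
        rw [hdefeq, heq]
      rw [hstep]
      exact ih fuel' g' (news ++ stk') hJB' (by push_cast at hM ⊢; omega) (by omega)

-- two grids of the same shape with equal labels everywhere are equal
lemma pvGrids_eq {R C : Nat} {a b : List (List Int)} (ha : pvSh R C a) (hb : pvSh R C b)
    (h : ∀ u, pvValidU R C u → pvVal a u = pvVal b u) : a = b := by
  obtain ⟨hal, har⟩ := ha
  obtain ⟨hbl, hbr⟩ := hb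
  apply List.ext_getElem (by omega)
  intro i h1 h2
  apply List.ext_getElem
  · rw [har _ (List.getElem_mem h1), hbr _ (List.getElem_mem h2)]
  · intro j hj1 hj2
    have hic : i < R := by omega
    have hjc : j < C := by rw [har _ (List.getElem_mem h1)] at hj1; exact hj1
    have hval := h (i, j) ⟨hic, hjc⟩
    simp only [pvVal, pvNRead] at hval
    rwa [List.getD_eq_getElem a [] h1, List.getD_eq_getElem _ 0 hj1,
      List.getD_eq_getElem b [] h2, List.getD_eq_getElem _ 0 hj2] at hval

-- ===== VERDICT (by name: the statement is the Claim_ definition above) =====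
theorem simulateWaterFlow_spec : Claim_equal_simulateWaterFlow := by
  intro heights sr sc hdom hpre
  obtain ⟨hne, hpos, hrag, ha1, ha2, ha3, ha4⟩ := hpre
  show simulateWaterFlow heights sr sc = simulateWaterFlow_alt heights sr sc
  have hh : PySem.List.pyGetD heights 0 [] = heights.headI := by
    cases heights with
    | nil => exact absurd rfl hne
    | cons h0 tl => simp [PySem.List.pyGetD, PySem.List.pyGet?, PySem.List.pyIdx?]
  set R := heights.length with hR
  set C := (PySem.List.pyGetD heights 0 []).length with hCdef
  have hC : C = heights.headI.length := by rw [hCdef, hh]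
  have hC1 : 0 < C := by rw [hC]; exact hpos
  have hR1 : 0 < R := by rw [hR]; exact List.length_pos_of_ne_nil hne
  set wet0 := List.replicate R (List.replicate C (-1 : Int)) with hw0
  have hsh0 : pvSh R C wet0 := by
    constructor
    · simp [hw0]
    · intro row h
      rw [List.eq_of_mem_replicate h]
      simp
  have hlb0 : ∀ u, pvValidU R C u → -1 ≤ pvVal wet0 u := by
    intro u hu
    simp [hw0, pvVal, pvNRead, List.getD_eq_getElem?_getD, List.getElem?_replicate, hu.1, hu.2]
  have hsrc : pvInR R C (sr, sc) := ⟨ha1, ha2, by rw [hC]; exact ha3, by rw [hC]; exact ha4⟩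
  set src := pvSrcSlot R C sr sc with hsrcdef
  have hsv : pvValidU R C src := pvValidU_slotOf hsrc
  have hread0 : pvVal wet0 src = -1 := by
    simp [hw0, pvVal, pvNRead, pvSrcSlot, List.getD_eq_getElem?_getD, List.getElem?_replicate,
      hsv.1, hsv.2]
  set wet1 := pvWrite wet0 sr sc 0 with hw1
  have hwe : wet1 = pvNWrite wet0 src.1 src.2 0 := by
    rw [hw1, pvWrite_eq hsh0 hsrc 0]
    rfl
  have hsh1 : pvSh R C wet1 := by rw [hwe]; exact pvSh_pvNWrite hsh0 src.1 src.2 0 hsv.1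
  have hval1 : ∀ u, pvVal wet1 u = if u = src then 0 else pvVal wet0 u := by
    intro u; rw [hwe]; exact pvVal_pvNWrite hsh0 hsv 0 u
  have hlb1 : ∀ u, pvValidU R C u → -1 ≤ pvVal wet1 u := by
    intro u hu
    rw [hval1 u]
    split_ifs with hc
    · omega
    · exact hlb0 u hu
  have hval1' : ∀ u, pvValidU R C u → u ≠ src → pvVal wet1 u = -1 := by
    intro u hu hne'
    rw [hval1 u, if_neg hne']
    simp [hw0, pvVal, pvNRead, List.getD_eq_getElem?_getD, List.getElem?_replicate, hu.1, hu.2]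
  have hsrc1 : pvVal wet1 src = 0 := by rw [hval1, if_pos rfl]
  have hcnt0 : pvCount wet0 = R * C := by
    rw [hw0]
    simp [pvCount, List.map_replicate, pvCountP_repl, List.sum_replicate, smul_eq_mul]
  have hcnt1 : pvCount wet1 + 1 = R * C := by
    rw [hwe, ← hcnt0]
    exact pvCount_pvNWrite hsh0 hsv hread0 (by decide)
  have hpot0 : pvPot R C wet0 = ((R * C : Nat) : Int) * (((R * C : Nat) : Int) + 1) := by
    rw [hw0]; exact pvPot_init R C
  have hpot1 : pvPot R C wet1 + (((R * C : Nat) : Int) + 1) = pvPot R C wet0 := by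
    have h := pvPot_pvNWrite (v := 0) hsh0 hsv
    rw [hread0] at h
    rw [hwe]
    rw [if_pos rfl, if_neg (by decide : (0 : Int) ≠ -1)] at h
    linarith [h]
  -- ===== run A =====
  have hIA : pvIA heights R C sr sc wet1 [(sr, sc)] [] 0 := by
    refine ⟨hsh1, le_refl 0, hlb1, hsrc1, ?_, ?_, ?_, ?_, by simp, ?_⟩
    · intro u hu h0
      by_contra hne'
      rw [hval1' u hu hne'] at h0
      omega
    · intro u hu hw
      rw [hval1 u] at hw ⊢
      split_ifs with hc
      · omega
      · split_ifs at hw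
        exact absurd (by
          simp [hw0, pvVal, pvNRead, List.getD_eq_getElem?_getD, List.getElem?_replicate,
            hu.1, hu.2]) hw
    · intro v hv h1
      exfalso
      rw [hval1 v] at h1
      split_ifs at h1 with hc
      · omega
      · rw [show pvVal wet0 v = -1 from by
          simp [hw0, pvVal, pvNRead, List.getD_eq_getElem?_getD, List.getElem?_replicate,
            hv.1, hv.2]] at h1
        omega
    · intro e he
      simp only [List.mem_singleton] at he
      subst he
      exact ⟨Or.inl rfl, by rw [show pvSlotOf R C (sr, sc) = src from rfl]; exact hsrc1⟩
    · intro u hu hw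
      left
      refine ⟨(sr, sc), by simp, ?_⟩
      by_contra hne'
      rw [hval1' u hu (by
        rw [show pvSlotOf R C (sr, sc) = src from rfl] at hne'
        exact fun h => hne' h.symm)] at hw
      exact hw rfl
  have hpostW := pvALoop_post heights R C sr sc hsrc (2 * (R * C) + 1) (10 * R * C + 4)
    wet1 [(sr, sc)] [] 0 hIA
    (by
      simp only [List.append_nil, List.length_singleton]
      nlinarith [hcnt1])
    (by nlinarith [hcnt1, Nat.zero_le (R * C)])
  rw [List.append_nil] at hpostW
  set W := pvALoop heights (R : Int) (C : Int) (10 * R * C + 4) wet1 [(sr, sc)] with hW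
  -- ===== run B =====
  obtain ⟨p1, p2, p3, p4, p5, p6⟩ := hpostW
  have hJB : pvJB heights R C sr sc W wet1 [(sr, sc)] := by
    refine ⟨hsh1, hlb1, ?_, hsrc1, ?_, ?_, ?_⟩
    · intro u hu hw
      have hu' : u = src := by
        by_contra hne'
        exact hw (hval1' u hu hne')
      subst hu'
      rw [hsrc1]
      have : (pvCount wet1 : Int) + 1 = ((R * C : Nat) : Int) := by exact_mod_cast hcnt1
      omega
    · intro u hu hw
      have hu' : u = src := by
        by_contra hne'
        exact hw (hval1' u hu hne')
      subst hu'
      rw [hsrc1, p3]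
      exact ⟨by omega, le_refl 0⟩
    · intro e he
      simp only [List.mem_singleton] at he
      subst he
      exact ⟨Or.inl rfl, by rw [show pvSlotOf R C (sr, sc) = src from rfl, hsrc1]; omega⟩
    · intro u hu hw
      left
      refine ⟨(sr, sc), by simp, ?_⟩
      by_contra hne'
      rw [hval1' u hu (by
        rw [show pvSlotOf R C (sr, sc) = src from rfl] at hne'
        exact fun h => hne' h.symm)] at hw
      exact hw rfl
  have hrun := pvBLoop_run heights R C sr sc W hsrc ⟨p1, p2, p3, p4, p5, p6⟩
    (2 * (R * C) * (R * C + 1) + 2) (3 * (R * C + 2) * (R * C + 2)) wet1 [(sr, sc)] hJB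
    (by
      simp only [List.length_singleton]
      push_cast at hpot0 hpot1 ⊢
      nlinarith [hpot0, hpot1, sq_nonneg ((R : Int) * C)])
    (by nlinarith [Nat.zero_le (R * C)])
  obtain ⟨hshB, hvalB⟩ := hrun
  -- ===== combine =====
  have hgoal : pvBLoop heights (R : Int) (C : Int) (3 * (R * C + 2) * (R * C + 2)) wet1
      [(sr, sc)] = W := pvGrids_eq hshB p1 hvalB
  show pvALoop heights (R : Int) (C : Int) (10 * R * C + 4) wet1 [(sr, sc)]
    = pvBLoop heights (R : Int) (C : Int) (3 * (R * C + 2) * (R * C + 2)) wet1 [(sr, sc)]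
  rw [hgoal]
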